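-- pv_equiv track=rewrite | github.com/ReyhanArdiya/Jay-ds-algo | mine/ch-20/group.py | groupV1
-- ===== SOURCE A (Python) =====
-- def groupV1(arr: list):
--     """
--     time O(N + M * E); N is first loop, M is second loop and E is third loop
--     space O(N + M); N is chars and M is grouped atleast
--      """
--     chars = {}
--
--     for val in arr:
--         if chars.get(val):
--             chars[val] += 1
--         else:
--             chars[val] = 1
--
--     grouped = []
--     for [key, val] in chars.items():
--         for _ in range(val):
--             grouped.append(key)
--
--     return grouped
-- ===== SOURCE B (Python) =====
-- def groupV1(arr: list):
--     first = {}
--     for i, v in enumerate(arr):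
--         first.setdefault(v, i)
--     return sorted(arr, key=first.__getitem__)
-- ===== Notes on version B (the rewrite author's own statement) =====
-- stated objective: alternative
-- what changed: Replaces the counting dict plus nested emit loops with a first-occurrence-index map and one stable sort of arr keyed by it, relying on sort stability to form the groups.
import Mathlib
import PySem

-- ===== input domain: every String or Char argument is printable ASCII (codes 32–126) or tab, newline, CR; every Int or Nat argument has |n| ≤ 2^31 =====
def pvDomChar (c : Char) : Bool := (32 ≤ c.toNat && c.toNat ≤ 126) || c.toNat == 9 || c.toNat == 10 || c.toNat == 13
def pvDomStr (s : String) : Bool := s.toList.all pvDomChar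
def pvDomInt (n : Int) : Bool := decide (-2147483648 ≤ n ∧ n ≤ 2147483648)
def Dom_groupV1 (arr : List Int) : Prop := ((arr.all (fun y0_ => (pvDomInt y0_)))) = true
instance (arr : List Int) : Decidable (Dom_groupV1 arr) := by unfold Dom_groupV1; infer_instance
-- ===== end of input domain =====

-- B replaces the counting dict plus nested emit loops by a first-occurrence-index map and one
-- stable sort of arr keyed by it (an alternative algorithm of similar cost).

-- ===== PORT A =====
def groupV1 (arr : List Int) : List Int :=
  let chars := arr.foldl
    (fun d v =>
      if d.getD v 0 ≠ 0 then d.insert v (d.getD v 0 + 1) else d.insert v 1)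
    (PySem.Dict.empty : PySem.Dict Int Int)
  chars.items.foldl
    (fun grouped p =>
      (PySem.List.pyRange 0 p.2 1).foldl (fun g _ => g ++ [p.1]) grouped) []

-- ===== PORT B =====
-- key first.__getitem__ is looked up only at elements of arr, where it always hits,
-- so getD is exact here.
def groupV1_alt (arr : List Int) : List Int :=
  let first := (PySem.List.enumerate arr 0).foldl
    (fun d p => d.setdefault p.2 p.1) (PySem.Dict.empty : PySem.Dict Int Int)
  PySem.List.sorted arr (fun v => first.getD v 0) false

-- ===== PRECONDITION & SPEC =====
def Spec_groupV1 (arr : List Int) (out : List Int) : Prop := out = groupV1_alt arr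
instance (arr : List Int) (out : List Int) : Decidable (Spec_groupV1 arr out) := by unfold Spec_groupV1; infer_instance

-- ===== CLAIM (what is proved, stated in full; the proofs are below) =====
def Claim_equal_groupV1 : Prop := ∀ (arr : List Int), Dom_groupV1 arr → Spec_groupV1 arr (groupV1 arr)

-- ===== LEMMAS AND PROOFS =====

-- A's counting loop is the Counter fold: both branches insert v (getD v 0 + 1).
lemma groupV1_fold_eq_counter (arr : List Int) :
    arr.foldl
      (fun d v =>
        if d.getD v 0 ≠ 0 then d.insert v (d.getD v 0 + 1) else d.insert v 1)
      (PySem.Dict.empty : PySem.Dict Int Int) = PySem.Dict.counter arr := by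
  rw [← PySem.Dict.foldl_insert_getD_add_one_eq_counter]
  congr 1
  funext d v
  split_ifs with h
  · rfl
  · simp at h
    rw [h]
    norm_num

-- A's output in closed form: the distinct values in first-occurrence order, each repeated its count.
lemma groupV1_eq_flatMap (arr : List Int) :
    groupV1 arr = (PySem.Set.ofList arr).flatMap
      (fun k => List.replicate (arr.count k) k) := by
  unfold groupV1
  rw [groupV1_fold_eq_counter]
  simp only [PySem.List.foldl_append_singleton_eq_map]
  rw [PySem.List.foldl_append_eq_flatMap]
  simp [PySem.Dict.items_counter, List.flatMap_map]

-- a default value other than 0 is irrelevant at a contained key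
lemma getD_irrel (d : PySem.Dict Int Int) (v s : Int) (hc : d.contains v = true) :
    d.getD v s = d.getD v 0 := by
  rw [PySem.Dict.getD_eq_get?_getD, PySem.Dict.getD_eq_get?_getD]
  rw [PySem.Dict.contains_eq_isSome_get?] at hc
  cases h : d.get? v with
  | none => rw [h] at hc; simp at hc
  | some w => simp

-- B's setdefault loop: full invariant over any start index and start dict.
lemma setdefault_fold_getD (v : Int) : ∀ (l : List Int) (s : Int) (d : PySem.Dict Int Int),
    ((PySem.List.enumerate l s).foldl (fun d p => d.setdefault p.2 p.1) d).getD v 0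
    = if d.contains v then d.getD v 0
      else if v ∈ l then s + (l.idxOf v : Int) else 0 := by
  intro l
  induction l with
  | nil =>
    intro s d
    rw [PySem.List.enumerate_nil]
    simp only [List.foldl_nil, List.not_mem_nil, if_false]
    by_cases hc : d.contains v
    · simp [hc]
    · simp only [Bool.not_eq_true] at hc
      simp [hc, PySem.Dict.getD_of_not_contains _ _ hc]
  | cons x t ih =>
    intro s d
    rw [PySem.List.enumerate_cons]
    simp only [List.foldl_cons]
    rw [ih]
    by_cases hx : v = x
    · subst hx
      rw [PySem.Dict.contains_setdefault]
      simp only [BEq.rfl, Bool.true_or, if_true, PySem.Dict.getD_setdefault_self]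
      by_cases hc : d.contains v
      · simp [hc, getD_irrel d v s hc]
      · simp only [Bool.not_eq_true] at hc
        rw [PySem.Dict.getD_of_not_contains _ _ hc]
        simp [hc, List.idxOf_cons_self]
    · rw [PySem.Dict.contains_setdefault]
      have hbe : (v == x) = false := by simp [hx]
      rw [hbe, Bool.false_or]
      by_cases hc : d.contains v
      · simp [hc, PySem.Dict.getD_eq_get?_getD, PySem.Dict.get?_setdefault_of_ne _ _ hx]
      · simp only [hc, Bool.false_eq_true, if_false]
        by_cases ht : v ∈ t
        · have hm : v ∈ x :: t := List.mem_cons_of_mem _ ht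
          simp only [ht, hm, if_true]
          rw [List.idxOf_cons_ne _ (fun h => hx h.symm)]
          push_cast
          ring
        · have hm : v ∉ x :: t := by simp [hx, ht]
          simp [ht, hm]

-- B's key is the first-occurrence index at every element of arr.
lemma groupV1_key_eq_idxOf (arr : List Int) (v : Int) (hv : v ∈ arr) :
    ((PySem.List.enumerate arr 0).foldl
      (fun d p => d.setdefault p.2 p.1) (PySem.Dict.empty : PySem.Dict Int Int)).getD v 0
    = (arr.idxOf v : Int) := by
  rw [setdefault_fold_getD]
  simp [hv]

-- equal first-occurrence indices identify equal elements of arr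
lemma idxOf_inj (arr : List Int) (a b : Int) (ha : a ∈ arr) (hb : b ∈ arr)
    (h : arr.idxOf a = arr.idxOf b) : a = b := by
  have h1 := List.getElem_idxOf (List.idxOf_lt_length_of_mem ha)
  have h2 := List.getElem_idxOf (List.idxOf_lt_length_of_mem hb)
  rw [← h1, ← h2]
  simp [h]

-- dedup is strictly increasing in first-occurrence index.
lemma ofList_pairwise_idxOf : ∀ (arr : List Int),
    (PySem.Set.ofList arr).Pairwise (fun a b => arr.idxOf a < arr.idxOf b) := by
  intro arr
  induction arr with
  | nil => simp [PySem.Set.ofList]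
  | cons x t ih =>
    have hcons : PySem.Set.ofList (x :: t) = PySem.Set.update [x] t := rfl
    rw [hcons, PySem.Set.update_eq_append_filter, List.pairwise_append]
    refine ⟨List.pairwise_singleton _ _, ?_, ?_⟩
    · have h1 := List.Pairwise.filter (fun y => !PySem.Set.contains [x] y) ih
      refine h1.imp_of_mem ?_
      intro a b ha hb hlt
      have hax : a ≠ x := by
        have := (List.mem_filter.mp ha).2
        simp [PySem.Set.contains] at this
        exact this
      have hbx : b ≠ x := by
        have := (List.mem_filter.mp hb).2
        simp [PySem.Set.contains] at this
        exact this
      rw [List.idxOf_cons_ne _ (Ne.symm hax), List.idxOf_cons_ne _ (Ne.symm hbx)]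
      omega
    · intro a ha b hb
      have hax : a = x := by simpa using ha
      have hbx : b ≠ x := by
        have := (List.mem_filter.mp hb).2
        simp [PySem.Set.contains] at this
        exact this
      rw [hax, List.idxOf_cons_self, List.idxOf_cons_ne _ (Ne.symm hbx)]
      omega

-- counting elements of the closed form
lemma count_flatMap_replicate (c : Int → Nat) (y : Int) :
    ∀ (keys : List Int), keys.Nodup →
    (keys.flatMap (fun k => List.replicate (c k) k)).count y
      = if y ∈ keys then c y else 0 := by
  intro keys
  induction keys with
  | nil => simp
  | cons k ks ih =>
    intro hnd
    rw [List.flatMap_cons, List.count_append, ih hnd.of_cons]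
    by_cases hy : y = k
    · subst hy
      have : y ∉ ks := (List.nodup_cons.mp hnd).1
      simp [this]
    · have hky : k ≠ y := Ne.symm hy
      simp [List.count_replicate, hky, hy]

-- the closed form is a permutation of arr.
lemma flatMap_replicate_perm (arr : List Int) :
    ((PySem.Set.ofList arr).flatMap (fun k => List.replicate (arr.count k) k)).Perm arr := by
  rw [List.perm_iff_count]
  intro y
  rw [count_flatMap_replicate _ y _ (PySem.Set.nodup_ofList arr)]
  by_cases hy : y ∈ arr
  · simp [(PySem.Set.mem_ofList arr y).mpr hy]
  · simp [hy, (PySem.Set.mem_ofList arr y), List.count_eq_zero.mpr hy]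

-- blocks of a key-sorted key list, pairwise under the key order
lemma pairwise_flatMap_replicate (K : Int → Int) (c : Int → Nat) :
    ∀ (keys : List Int), keys.Pairwise (fun a b => K a ≤ K b) →
    (keys.flatMap (fun k => List.replicate (c k) k)).Pairwise (fun a b => K a ≤ K b) := by
  intro keys
  induction keys with
  | nil => simp
  | cons k ks ih =>
    intro hp
    rw [List.pairwise_cons] at hp
    rw [List.flatMap_cons, List.pairwise_append]
    refine ⟨?_, ih hp.2, ?_⟩
    · rw [List.pairwise_replicate]
      exact Or.inr (le_refl _)
    intro a ha b hb
    rw [List.eq_of_mem_replicate ha]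
    obtain ⟨k', hk', hbk⟩ := List.mem_flatMap.mp hb
    rw [List.eq_of_mem_replicate hbk]
    exact hp.1 k' hk'

-- the closed form is sorted by any key that is monotone in first-occurrence index
lemma flatMap_replicate_pairwise (arr : List Int) (K : Int → Int)
    (hK : ∀ v ∈ arr, K v = (arr.idxOf v : Int)) :
    ((PySem.Set.ofList arr).flatMap (fun k => List.replicate (arr.count k) k)).Pairwise
      (fun a b => K a ≤ K b) := by
  refine pairwise_flatMap_replicate K _ _ ?_
  refine (ofList_pairwise_idxOf arr).imp_of_mem ?_
  intro a b ha hb hlt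
  rw [hK a ((PySem.Set.mem_ofList arr a).mp ha), hK b ((PySem.Set.mem_ofList arr b).mp hb)]
  omega

-- ===== VERDICT (by name: the statement is the Claim_ definition above) =====
theorem groupV1_spec : Claim_equal_groupV1 := by
  intro arr _
  show groupV1 arr = groupV1_alt arr
  have halt : groupV1_alt arr = PySem.List.sorted arr
      (fun v => ((PySem.List.enumerate arr 0).foldl
        (fun d p => d.setdefault p.2 p.1) (PySem.Dict.empty : PySem.Dict Int Int)).getD v 0)
      false := rfl
  rw [halt, groupV1_eq_flatMap]
  set K : Int → Int := fun v =>
    ((PySem.List.enumerate arr 0).foldl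
      (fun d p => d.setdefault p.2 p.1) (PySem.Dict.empty : PySem.Dict Int Int)).getD v 0
    with hKdef
  have hK : ∀ v ∈ arr, K v = (arr.idxOf v : Int) := fun v hv => groupV1_key_eq_idxOf arr v hv
  refine List.Perm.eq_of_pairwise (le := fun a b => K a ≤ K b) ?_ ?_ ?_ ?_
  · intro a b ha hb hab hba
    have ha' : a ∈ arr := by
      obtain ⟨k, hk, hm⟩ := List.mem_flatMap.mp ha
      rw [List.eq_of_mem_replicate hm]
      exact (PySem.Set.mem_ofList arr k).mp hk
    have hb' : b ∈ arr := (PySem.List.mem_sorted arr K false b).mp hb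
    apply idxOf_inj arr a b ha' hb'
    rw [hK a ha', hK b hb'] at hab hba
    omega
  · exact flatMap_replicate_pairwise arr K hK
  · exact PySem.List.sorted_pairwise arr K
  · exact ((flatMap_replicate_perm arr).trans ((PySem.List.sorted_perm arr K false).symm))
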